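-- pv_equiv track=rewrite | github.com/hany0147/algorithm | 프로그래머스/1/135808. 과일 장수/과일 장수.py | solution
-- ===== SOURCE A (Python) =====
-- def solution(k, m, score):
--     score.sort(reverse = True)
--
--     res = []
--
--     tmp = []
--     cnt = 0
--
--     for i in score:
--         tmp.append(i)
--         cnt += 1
--         if cnt == m:
--             res.append(tmp)
--             tmp = []
--             cnt = 0
--
--     answer = 0
--
--     for i in res:
--         answer += min(i) * m
--
--     return answer
-- ===== SOURCE B (Python) =====
-- def solution(k, m, score):
--     # Counting approach: frequency dict + one walk over the distinct values in
--     # descending order; NOTE: unlike A, B does not sort `score` in place.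
--     counts = {}
--     for v in score:
--         counts[v] = counts.get(v, 0) + 1
--     full = len(score) - len(score) % m
--     answer = 0
--     pos = 0
--     for v in sorted(counts, reverse=True):
--         nxt = pos + counts[v]
--         answer += v * (min(nxt, full) // m - min(pos, full) // m)
--         pos = nxt
--     return answer * m
-- ===== Notes on version B (the rewrite author's own statement) =====
-- stated objective: alternative
-- what changed: B replaces A's sort-reshape-and-min pipeline by a counting algorithm: it builds a frequency dictionary of the scores, walks only the distinct values in descending order, and counts with floor-division arithmetic how many box-minimum positions each value's run of duplicates covers; no sorted copy of the full list, no boxes, no min() scans.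
-- outside the precondition, e.g. on solution(0, 0, [1, 2]): A returns 0, B raises ZeroDivisionError; on solution(0, -2, [3, 1]): A returns 0, B returns 6
import Mathlib
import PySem

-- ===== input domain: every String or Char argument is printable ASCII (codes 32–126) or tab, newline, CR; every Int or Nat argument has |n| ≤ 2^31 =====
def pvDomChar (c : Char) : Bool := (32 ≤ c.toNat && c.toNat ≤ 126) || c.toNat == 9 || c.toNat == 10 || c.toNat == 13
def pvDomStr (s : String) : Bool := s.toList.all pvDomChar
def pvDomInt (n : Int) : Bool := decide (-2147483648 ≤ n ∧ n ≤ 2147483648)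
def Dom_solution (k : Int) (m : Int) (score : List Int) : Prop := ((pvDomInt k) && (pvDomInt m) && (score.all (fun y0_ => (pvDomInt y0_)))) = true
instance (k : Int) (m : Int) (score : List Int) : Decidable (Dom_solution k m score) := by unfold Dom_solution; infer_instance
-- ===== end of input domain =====

-- B computes the same total by a counting algorithm (frequency dict + a walk over the
-- distinct values in descending order) instead of A's sort/reshape/min pipeline.
-- A sorts `score` in place; B does not mutate it — the equivalence proved is about the return value.

-- ===== PORT A =====
def solution (k : Int) (m : Int) (score : List Int) : Int :=
  let s := PySem.List.sorted score (fun x => x) true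
  let st := s.foldl
    (fun (acc : List (List Int) × List Int × Int) i =>
      let tmp := acc.2.1 ++ [i]
      let cnt := acc.2.2 + 1
      if cnt = m then (acc.1 ++ [tmp], ([] : List Int), (0 : Int))
      else (acc.1, tmp, cnt))
    ([], [], 0)
  -- min(i): i is never empty here (res holds only boxes of exactly m ≥ 1 elements), so .getD 0 is never used
  st.1.foldl (fun answer i => answer + (PySem.List.min? i (fun x => x)).getD 0 * m) 0

-- ===== PORT B =====
def solution_alt (k : Int) (m : Int) (score : List Int) : Int :=
  let counts := score.foldl (fun d v => d.insert v (d.getD v 0 + 1)) PySem.Dict.empty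
  let full : Int := (score.length : Int) - PySem.Int.mod (score.length : Int) m
  let st := (PySem.List.sorted counts.keys (fun x => x) true).foldl
    (fun (acc : Int × Int) v =>
      let nxt := acc.2 + counts.getD v 0
      (acc.1 + v * (PySem.Int.floordiv (min nxt full) m - PySem.Int.floordiv (min acc.2 full) m),
       nxt))
    (0, 0)
  st.1 * m

-- ===== PRECONDITION & SPEC =====
-- Pre_ restricts to the natural domain of a box size, m ≥ 1: for m = 0 B's `len(score) % m`
-- raises ZeroDivisionError (A returns 0 there only because no box ever fills), and m < 0 is
-- a meaningless box size on which A's 0 is an accident of its never-firing counter.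
def Pre_solution (k : Int) (m : Int) (score : List Int) : Prop := 1 ≤ m
instance (k : Int) (m : Int) (score : List Int) : Decidable (Pre_solution k m score) := by unfold Pre_solution; infer_instance
def pvWitness_solution : Int × Int × List Int := (4, 2, [1, 2, 3])

def Spec_solution (k : Int) (m : Int) (score : List Int) (out : Int) : Prop := out = solution_alt k m score
instance (k : Int) (m : Int) (score : List Int) (out : Int) : Decidable (Spec_solution k m score out) := by unfold Spec_solution; infer_instance

-- ===== CLAIM (what is proved, stated in full; the proofs are below) =====
def Claim_equal_solution : Prop := ∀ (k : Int) (m : Int) (score : List Int), Dom_solution k m score → Pre_solution k m score → Spec_solution k m score (solution k m score)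

-- ===== LEMMAS AND PROOFS =====

-- the common value both sides compute: sum over full boxes of the smallest element of each box
def pvChunkMins (m' : Nat) (l : List Int) : Int :=
  if h : 0 < m' ∧ m' ≤ l.length then l.getD (m' - 1) 0 + pvChunkMins m' (l.drop m') else 0
termination_by l.length
decreasing_by simp; omega

-- A's chunking step
def pvStepA (m : Int) (acc : List (List Int) × List Int × Int) (i : Int) : List (List Int) × List Int × Int :=
  let tmp := acc.2.1 ++ [i]
  let cnt := acc.2.2 + 1
  if cnt = m then (acc.1 ++ [tmp], ([] : List Int), (0 : Int)) else (acc.1, tmp, cnt)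

theorem pvFoldl_addL (g : List Int → Int) : ∀ (xs : List (List Int)) (a : Int),
    xs.foldl (fun acc x => acc + g x) a = a + (xs.map g).sum := by
  intro xs
  induction xs with
  | nil => simp
  | cons x t ih => intro a; simp [ih]; ring

theorem pvFoldA_partial (m' : Nat) : ∀ (l t : List Int) (r : List (List Int)),
    t.length + l.length < m' →
    l.foldl (pvStepA (m' : Int)) (r, t, (t.length : Int)) = (r, t ++ l, ((t.length + l.length : Nat) : Int)) := by
  intro l
  induction l with
  | nil => intro t r _; simp
  | cons i l' ih =>
    intro t r h
    have hne : ¬ ((t.length : Int) + 1 = (m' : Int)) := by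
      simp at h ⊢; omega
    simp only [List.foldl_cons, pvStepA, hne, if_false]
    have := ih (t ++ [i]) r (by simp at h ⊢; omega)
    simp at this ⊢
    rw [show (t.length : Int) + 1 = ((t ++ [i]).length : Int) by simp] at *
    rw [this]
    simp only [Prod.mk.injEq, List.length_append, List.length_cons, List.length_nil]
    refine ⟨trivial, trivial, ?_⟩
    push_cast
    ring

theorem pvFoldA_fill (m' : Nat) : ∀ (l t : List Int) (r : List (List Int)),
    t.length + l.length = m' → l ≠ [] →
    l.foldl (pvStepA (m' : Int)) (r, t, (t.length : Int)) = (r ++ [t ++ l], [], 0) := by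
  intro l
  induction l with
  | nil => intro t r _ hne; exact absurd rfl hne
  | cons i l' ih =>
    intro t r h _
    by_cases hnil : l' = []
    · subst hnil
      have heq : (t.length : Int) + 1 = (m' : Int) := by simp at h; omega
      simp only [List.foldl_cons, pvStepA, heq, if_pos rfl, List.foldl_nil]
      simp [heq]
    · have hne : ¬ ((t.length : Int) + 1 = (m' : Int)) := by
        have : 0 < l'.length := List.length_pos_iff.mpr hnil
        simp at h ⊢; omega
      simp only [List.foldl_cons, pvStepA, hne, if_false]
      have := ih (t ++ [i]) r (by simp at h ⊢; omega) hnil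
      simp at this ⊢
      rw [show (t.length : Int) + 1 = ((t ++ [i]).length : Int) by simp] at *
      rw [this]

theorem pvMin_take (m' : Nat) (l : List Int) (hp : List.Pairwise (fun a b : Int => b ≤ a) l)
    (hm : 0 < m') (hlen : m' ≤ l.length) :
    (PySem.List.min? (l.take m') (fun x => x)).getD 0 = l.getD (m' - 1) 0 := by
  have hidx : m' - 1 < l.length := by omega
  have hgetD : l.getD (m' - 1) 0 = l[m' - 1] := List.getD_eq_getElem l 0 hidx
  have htne : l.take m' ≠ [] := by
    intro hnil
    have h2 : (l.take m').length = 0 := by rw [hnil]; rfl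
    rw [List.length_take] at h2
    omega
  obtain ⟨v, hv⟩ : ∃ v, PySem.List.min? (l.take m') (fun x => x) = some v := by
    cases hmin : PySem.List.min? (l.take m') (fun x => x) with
    | none => exact absurd ((PySem.List.min?_eq_none_iff _ _).mp hmin) htne
    | some v => exact ⟨v, rfl⟩
  have hvmem : v ∈ l.take m' := PySem.List.min?_mem hv
  have hvmin : ∀ y ∈ l.take m', v ≤ y := PySem.List.min?_isMin hv
  have hmem : l[m' - 1] ∈ l.take m' := by
    rw [List.mem_take_iff_getElem]
    exact ⟨m' - 1, by omega, rfl⟩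
  have h1 : v ≤ l[m' - 1] := hvmin _ hmem
  obtain ⟨j, hj, hjv⟩ := List.mem_take_iff_getElem.mp hvmem
  have hjlt : j < l.length := by omega
  have h2 : l[m' - 1] ≤ v := by
    rcases Nat.lt_or_ge j (m' - 1) with hlt | hge
    · have := List.pairwise_iff_getElem.mp hp j (m' - 1) hjlt hidx hlt
      omega
    · have hje : j = m' - 1 := by omega
      subst hje
      omega
  rw [hv, hgetD]
  simp
  omega

theorem pvChunkMins_pos (m' : Nat) (l : List Int) (hm : 0 < m') (hlen : m' ≤ l.length) :
    pvChunkMins m' l = l.getD (m' - 1) 0 + pvChunkMins m' (l.drop m') := by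
  rw [pvChunkMins]
  simp [hm, hlen]

theorem pvChunkMins_short (m' : Nat) (l : List Int) (hlen : ¬ (0 < m' ∧ m' ≤ l.length)) :
    pvChunkMins m' l = 0 := by
  rw [pvChunkMins]
  simp [hlen]

-- A's whole computation on a descending list equals pvChunkMins · m
theorem pvA_main (m' : Nat) (hm : 0 < m') : ∀ (n : Nat) (l : List Int), l.length = n →
    List.Pairwise (fun a b : Int => b ≤ a) l → ∀ (r : List (List Int)),
    ((l.foldl (pvStepA (m' : Int)) (r, [], 0)).1.map
        (fun i => (PySem.List.min? i (fun x => x)).getD 0 * (m' : Int))).sum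
      = ((r.map (fun i => (PySem.List.min? i (fun x => x)).getD 0 * (m' : Int))).sum)
        + pvChunkMins m' l * (m' : Int) := by
  intro n
  induction n using Nat.strong_induction_on with
  | _ n ihn =>
    intro l hlen hp r
    by_cases hcase : m' ≤ l.length
    · have htk : (l.take m').length = m' := by simp; omega
      have hsplit : l = l.take m' ++ l.drop m' := (List.take_append_drop m' l).symm
      have hfold : l.foldl (pvStepA (m' : Int)) (r, [], 0)
          = (l.drop m').foldl (pvStepA (m' : Int)) (r ++ [l.take m'], [], 0) := by
        conv_lhs => rw [hsplit]
        rw [List.foldl_append]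
        congr 1
        have := pvFoldA_fill m' (l.take m') [] r (by simpa using htk)
          (by intro h; rw [h] at htk; simp at htk; omega)
        simpa using this
      rw [hfold]
      have hdp : List.Pairwise (fun a b : Int => b ≤ a) (l.drop m') :=
        hp.sublist (List.drop_sublist m' l)
      have hdl : (l.drop m').length < n := by simp; omega
      rw [ihn _ hdl (l.drop m') rfl hdp (r ++ [l.take m'])]
      rw [pvChunkMins_pos m' l hm hcase]
      rw [← pvMin_take m' l hp hm hcase]
      simp
      ring
    · have hpar := pvFoldA_partial m' l [] r (by simpa using (by omega : l.length < m'))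
      simp only [List.length_nil, Nat.cast_zero, List.nil_append, Nat.zero_add, zero_add] at hpar
      rw [hpar, pvChunkMins_short m' l (by omega)]
      simp

-- the box-minimum index sum equals pvChunkMins
theorem pvB_sum (m' : Nat) (hm : 0 < m') : ∀ (n : Nat) (l : List Int), l.length = n →
    ((List.range (l.length / m')).map (fun k => l.getD (k * m' + m' - 1) 0)).sum
      = pvChunkMins m' l := by
  intro n
  induction n using Nat.strong_induction_on with
  | _ n ihn =>
    intro l hlen
    by_cases hcase : m' ≤ l.length
    · have hq : l.length / m' = (l.length - m') / m' + 1 := Nat.div_eq_sub_div hm hcase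
      have hdl : (l.drop m').length = l.length - m' := by simp
      rw [hq, List.range_succ_eq_map]
      simp only [List.map_cons, List.map_map, List.sum_cons]
      rw [pvChunkMins_pos m' l hm hcase]
      have hrec := ihn (l.drop m').length (by omega) (l.drop m') rfl
      rw [hdl] at hrec
      rw [← hrec]
      congr 1
      · simp
      · congr 1
        apply List.map_congr_left
        intro k _
        simp only [Function.comp_apply, Nat.succ_eq_add_one, List.getD_eq_getElem?_getD,
          List.getElem?_drop]
        congr 2
        have h1 : (k + 1) * m' = k * m' + m' := by ring
        omega
    · have : l.length / m' = 0 := Nat.div_eq_of_lt (by omega)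
      rw [this, pvChunkMins_short m' l (by omega)]
      simp

-- ---- B-side machinery ----

-- capped box counter: number of completed boxes among the first P fruits (at most full boxes)
def pvF (fullN m' P : Nat) : Nat := (min P fullN) / m'

theorem pvRange'_split (a b q : Nat) (h1 : a ≤ b) (h2 : b ≤ q) :
    List.range' a (q - a) = List.range' a (b - a) ++ List.range' b (q - b) := by
  have h : List.range' a (b - a) 1 ++ List.range' (a + 1 * (b - a)) (q - b) 1
      = List.range' a (b - a + (q - b)) 1 := List.range'_append
  rw [one_mul, show a + (b - a) = b from by omega, show b - a + (q - b) = q - a from by omega] at h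
  exact h.symm

-- B's walk over value runs: from position P it adds the box minima at indices ≥ P
theorem pvB_fold (m' : Nat) (hm : 0 < m') (s : List Int) (fullN : Nat)
    (hfull : fullN = s.length - s.length % m') :
    ∀ (ks : List Int) (cntN : Int → Nat) (P : Nat) (acc : Int),
    (∀ v ∈ ks, 1 ≤ cntN v) →
    s.drop P = ks.flatMap (fun v => List.replicate (cntN v) v) →
    (ks.foldl (fun (a : Int × Int) v =>
        (a.1 + v * (PySem.Int.floordiv (min (a.2 + (cntN v : Int)) (fullN : Int)) (m' : Int)
                   - PySem.Int.floordiv (min a.2 (fullN : Int)) (m' : Int)), a.2 + (cntN v : Int)))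
      (acc, (P : Int))).1
    = acc + ((List.range' (pvF fullN m' P) (fullN / m' - pvF fullN m' P)).map
        (fun b => s.getD (b * m' + m' - 1) 0)).sum := by
  have hfle : fullN ≤ s.length := by omega
  intro ks
  induction ks with
  | nil =>
    intro cntN P acc _ h
    have hP : s.length ≤ P := by
      by_contra hc
      have : (s.drop P).length = s.length - P := by simp
      rw [h] at this
      simp at this
      omega
    have : pvF fullN m' P = fullN / m' := by
      unfold pvF
      congr 1
      omega
    rw [this]
    simp
  | cons v ks' ih =>
    intro cntN P acc hpos h
    have hv1 : 1 ≤ cntN v := hpos v List.mem_cons_self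
    have hlenP : (s.drop P).length = s.length - P := by simp
    have hlen2 : cntN v ≤ s.length - P := by
      have h2 := congrArg List.length h
      rw [hlenP] at h2
      simp [List.flatMap_cons] at h2
      omega
    have hPlt : P < s.length := by omega
    have hPle : P + cntN v ≤ s.length := by omega
    have hdrop : s.drop (P + cntN v) = ks'.flatMap (fun v => List.replicate (cntN v) v) := by
      have h1 : s.drop (P + cntN v) = (s.drop P).drop (cntN v) := by
        rw [List.drop_drop, Nat.add_comm]
      rw [h1, h, List.flatMap_cons]
      simp
    set c := cntN v with hc
    -- the step's Int arithmetic in terms of pvF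
    have hmin1 : min ((P : Int) + (c : Int)) ((fullN : Int)) = ((min (P + c) fullN : Nat) : Int) := by
      push_cast
      omega
    have hmin2 : min ((P : Int)) ((fullN : Int)) = ((min P fullN : Nat) : Int) := by
      push_cast
      omega
    have hfd1 : PySem.Int.floordiv (min ((P : Int) + (c : Int)) ((fullN : Int))) (m' : Int)
        = ((pvF fullN m' (P + c) : Nat) : Int) := by
      rw [hmin1, PySem.Int.floordiv_natCast]
      rfl
    have hfd2 : PySem.Int.floordiv (min ((P : Int)) ((fullN : Int))) (m' : Int)
        = ((pvF fullN m' P : Nat) : Int) := by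
      rw [hmin2, PySem.Int.floordiv_natCast]
      rfl
    simp only [List.foldl_cons]
    have hPc : (P : Int) + (c : Int) = ((P + c : Nat) : Int) := by push_cast; ring
    rw [hfd1, hfd2, hPc, ih cntN (P + c) _ (fun u hu => hpos u (List.mem_cons_of_mem v hu)) hdrop]
    -- arithmetic over the ranges
    have hF1F2 : pvF fullN m' P ≤ pvF fullN m' (P + c) := by
      unfold pvF
      exact Nat.div_le_div_right (by omega)
    have hF2Q : pvF fullN m' (P + c) ≤ fullN / m' := by
      unfold pvF
      exact Nat.div_le_div_right (by omega)
    -- split the big range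
    have hsplit : List.range' (pvF fullN m' P) (fullN / m' - pvF fullN m' P)
        = List.range' (pvF fullN m' P) (pvF fullN m' (P + c) - pvF fullN m' P)
          ++ List.range' (pvF fullN m' (P + c)) (fullN / m' - pvF fullN m' (P + c)) :=
      pvRange'_split _ _ _ hF1F2 hF2Q
    rw [hsplit, List.map_append, List.sum_append]
    -- every index in the first part carries value v
    have hconst : ∀ b ∈ List.range' (pvF fullN m' P) (pvF fullN m' (P + c) - pvF fullN m' P),
        s.getD (b * m' + m' - 1) 0 = v := by
      intro b hb
      rw [List.mem_range'_1] at hb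
      obtain ⟨hb1, hb2⟩ := hb
      have hb2' : b < pvF fullN m' (P + c) := by omega
      -- b ≥ pvF P and b < pvF (P+c) forces P ≤ fullN
      have hPfull : P ≤ fullN := by
        by_contra hc2
        have : pvF fullN m' P = pvF fullN m' (P + c) := by
          unfold pvF
          congr 1
          omega
        omega
      have hFP : pvF fullN m' P = P / m' := by unfold pvF; congr 1; omega
      have hidx1 : P ≤ b * m' + m' - 1 := by
        rw [hFP] at hb1
        have h3 : P / m' * m' ≤ b * m' := Nat.mul_le_mul_right m' hb1
        have h4 : P / m' * m' + P % m' = P := Nat.div_add_mod' P m'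
        have h5 : P % m' < m' := Nat.mod_lt P hm
        omega
      have hidx2 : b * m' + m' - 1 < P + c := by
        have h6 : pvF fullN m' (P + c) ≤ (P + c) / m' := by
          unfold pvF
          exact Nat.div_le_div_right (by omega)
        have h7 : (b + 1) * m' ≤ (P + c) / m' * m' := Nat.mul_le_mul_right m' (by omega)
        have h8 : (P + c) / m' * m' ≤ P + c := Nat.div_mul_le_self _ _
        have h9 : (b + 1) * m' = b * m' + m' := by ring
        omega
      -- read the value from the run
      have hj : b * m' + m' - 1 - P < c := by omega
      have hlt : b * m' + m' - 1 < s.length := by omega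
      have hdropget : s.getD (b * m' + m' - 1) 0 = (s.drop P).getD (b * m' + m' - 1 - P) 0 := by
        rw [List.getD_eq_getElem s 0 hlt, List.getD_eq_getElem _ 0 (by rw [hlenP]; omega)]
        rw [List.getElem_drop]
        congr 1
        omega
      have hrep : s.drop P = List.replicate c v ++ ks'.flatMap (fun v => List.replicate (cntN v) v) := by
        rw [h, List.flatMap_cons]
      rw [hdropget, hrep, List.getD_eq_getElem?_getD,
        List.getElem?_append_left (by simp [hj]), List.getElem?_replicate]
      simp [hj]
    rw [List.map_congr_left hconst]
    have hlen3 : (List.range' (pvF fullN m' P) (pvF fullN m' (P + c) - pvF fullN m' P)).length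
        = pvF fullN m' (P + c) - pvF fullN m' P := by simp
    rw [List.map_const', hlen3, List.sum_replicate]
    rw [nsmul_eq_mul, Nat.cast_sub hF1F2]
    ring

-- descending flatten of strictly descending runs
theorem pvFlat_pairwise (cntN : Int → Nat) : ∀ (ks : List Int),
    List.Pairwise (fun a b : Int => b < a) ks →
    List.Pairwise (fun a b : Int => b ≤ a) (ks.flatMap (fun v => List.replicate (cntN v) v)) := by
  intro ks
  induction ks with
  | nil => intro _; simp
  | cons v ks' ih =>
    intro hp
    rw [List.pairwise_cons] at hp
    obtain ⟨hv, hp'⟩ := hp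
    rw [List.flatMap_cons, List.pairwise_append]
    refine ⟨?_, ih hp', ?_⟩
    · exact List.pairwise_replicate.mpr (Or.inr le_rfl)
    · intro a ha b hb
      rw [List.eq_of_mem_replicate ha]
      rw [List.mem_flatMap] at hb
      obtain ⟨u, hu, hbu⟩ := hb
      rw [List.eq_of_mem_replicate hbu]
      exact le_of_lt (hv u hu)

-- count of x in the flatten of replicate-runs over nodup keys
theorem pvFlat_count (cntN : Int → Nat) (x : Int) : ∀ (ks : List Int), ks.Nodup →
    List.count x (ks.flatMap (fun v => List.replicate (cntN v) v))
      = if x ∈ ks then cntN x else 0 := by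
  intro ks
  induction ks with
  | nil => intro _; simp
  | cons v ks' ih =>
    intro hnd
    rw [List.nodup_cons] at hnd
    rw [List.flatMap_cons, List.count_append, List.count_replicate, ih hnd.2]
    by_cases hx : x = v
    · subst hx
      simp [hnd.1]
    · simp [hx, Ne.symm hx]

-- ===== VERDICT (by name: the statement is the Claim_ definition above) =====
theorem solution_spec : Claim_equal_solution := by
  intro k m score _ hpre
  unfold Spec_solution solution solution_alt
  dsimp only
  obtain ⟨m', rfl⟩ : ∃ m' : Nat, m = (m' : Int) := ⟨m.toNat, by unfold Pre_solution at hpre; omega⟩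
  have hm' : 0 < m' := by unfold Pre_solution at hpre; exact_mod_cast hpre
  set s := PySem.List.sorted score (fun x => x) true with hs
  have hp : List.Pairwise (fun a b : Int => b ≤ a) s :=
    PySem.List.sorted_pairwise_rev score (fun x : Int => x)
  -- ---- A side ----
  have hstepA : (fun (acc : List (List Int) × List Int × Int) (i : Int) =>
      let tmp := acc.2.1 ++ [i]
      let cnt := acc.2.2 + 1
      if cnt = (m' : Int) then (acc.1 ++ [tmp], ([] : List Int), (0 : Int))
      else (acc.1, tmp, cnt)) = pvStepA (m' : Int) := by
    funext acc i; simp [pvStepA]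
  rw [hstepA]
  rw [pvFoldl_addL (fun i => (PySem.List.min? i (fun x => x)).getD 0 * (m' : Int))]
  have hA := pvA_main m' hm' s.length s rfl hp []
  simp only [List.map_nil, List.sum_nil, zero_add] at hA ⊢
  rw [hA]
  -- ---- B side ----
  have hcounter : score.foldl (fun d v => d.insert v (d.getD v 0 + 1)) PySem.Dict.empty
      = PySem.Dict.counter score := PySem.Dict.foldl_insert_getD_add_one_eq_counter score
  rw [hcounter]
  set keys := PySem.List.sorted (PySem.Dict.counter score).keys (fun x => x) true with hkeys
  -- keys: strictly descending, covering exactly the members of score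
  have hknodup : keys.Nodup :=
    ((PySem.List.sorted_perm (PySem.Dict.counter score).keys (fun x : Int => x) true).nodup_iff).mpr
      (PySem.Dict.nodup_keys_counter score)
  have hkdesc : List.Pairwise (fun a b : Int => b ≤ a) keys :=
    PySem.List.sorted_pairwise_rev (PySem.Dict.counter score).keys (fun x : Int => x)
  have hkstrict : List.Pairwise (fun a b : Int => b < a) keys := by
    have := List.Pairwise.and hkdesc hknodup
    exact this.imp (fun {a b} h => lt_of_le_of_ne h.1 (Ne.symm h.2))
  have hkmem : ∀ x : Int, x ∈ keys ↔ x ∈ score := by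
    intro x
    rw [hkeys, PySem.List.mem_sorted, PySem.Dict.keys_counter, PySem.Set.mem_ofList]
  -- the flatten of the runs IS the descending-sorted list s
  set ys := keys.flatMap (fun v => List.replicate (score.count v) v) with hys
  have hperm : ys.Perm score := by
    rw [List.perm_iff_count]
    intro x
    rw [hys, pvFlat_count (fun v => score.count v) x keys hknodup]
    by_cases hx : x ∈ keys
    · simp [hx]
    · rw [if_neg hx]
      have : x ∉ score := fun hc => hx ((hkmem x).mpr hc)
      exact (List.count_eq_zero.mpr this).symm
  have hysdesc : List.Pairwise (fun a b : Int => b ≤ a) ys :=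
    pvFlat_pairwise (fun v => score.count v) keys hkstrict
  have hsys : s = ys :=
    ((PySem.List.sorted_perm score (fun x : Int => x) true).trans hperm.symm).eq_of_pairwise
      (fun a b _ _ hab hba => le_antisymm hba hab) hp hysdesc
  -- full = fullN as a Nat
  have hslen : s.length = score.length := PySem.List.length_sorted score (fun x : Int => x) true
  set n := score.length with hn
  have hmodle : n % m' ≤ n := Nat.le_of_lt_succ (by have := Nat.mod_le n m'; omega)
  have hfullI : (n : Int) - PySem.Int.mod (n : Int) (m' : Int) = ((n - n % m' : Nat) : Int) := by
    rw [PySem.Int.mod_natCast]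
    push_cast [Nat.cast_sub hmodle]
    ring
  set fullN := n - n % m' with hfullN
  rw [hfullI]
  -- rewrite the fold step via count values
  have hstepB : (fun (acc : Int × Int) (v : Int) =>
      let nxt := acc.2 + (PySem.Dict.counter score).getD v 0
      (acc.1 + v * (PySem.Int.floordiv (min nxt ((fullN : Nat) : Int)) (m' : Int)
                   - PySem.Int.floordiv (min acc.2 ((fullN : Nat) : Int)) (m' : Int)), nxt))
      = (fun (a : Int × Int) v =>
        (a.1 + v * (PySem.Int.floordiv (min (a.2 + ((score.count v : Nat) : Int)) ((fullN : Nat) : Int)) (m' : Int)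
                   - PySem.Int.floordiv (min a.2 ((fullN : Nat) : Int)) (m' : Int)),
         a.2 + ((score.count v : Nat) : Int))) := by
    funext a v
    rw [PySem.Dict.getD_counter]
  rw [hstepB]
  have hfull' : fullN = s.length - s.length % m' := by rw [hslen]
  have hdrop0 : s.drop 0 = keys.flatMap (fun v => List.replicate ((fun v => score.count v) v) v) := by
    simpa using hsys
  have hkpos : ∀ v ∈ keys, 1 ≤ score.count v := by
    intro v hv
    exact List.one_le_count_iff.mpr ((hkmem v).mp hv)
  have hB := pvB_fold m' hm' s fullN hfull' keys (fun v => score.count v) 0 0 hkpos hdrop0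
  rw [show ((0 : Nat) : Int) = (0 : Int) by simp] at hB
  rw [hB]
  have hF0 : pvF fullN m' 0 = 0 := by unfold pvF; simp
  rw [hF0]
  simp only [Nat.sub_zero, zero_add]
  have hrange : List.range' 0 (fullN / m') = List.range (fullN / m') := by
    rw [List.range_eq_range']
  rw [hrange]
  -- fullN / m' = n / m'
  have hQ : fullN / m' = n / m' := by
    have h1 : fullN = m' * (n / m') := by
      rw [hfullN]
      have := Nat.div_add_mod n m'
      omega
    rw [h1, Nat.mul_div_cancel_left _ hm']
  rw [hQ, ← hslen]
  rw [show (fun b => s.getD (b * m' + m' - 1) 0) = (fun k => s.getD (k * m' + m' - 1) 0) from rfl]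
  rw [pvB_sum m' hm' s.length s rfl]
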